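-- pv_equiv track=rewrite | github.com/zyouhouhan/python-crypto-demo | my-crypto-app.py | inv_mix_columns
-- ===== SOURCE A (Python) =====
-- def inv_mix_columns(state):
--     def gmul(a, b):
--         p = 0
--         for _ in range(8):
--             if b & 1: p ^= a
--             hi_bit_set = a & 0x80
--             a <<= 1
--             if hi_bit_set: a ^= 0x1b
--             a &= 0xff
--             b >>= 1
--         return p
--     for i in range(4):
--         s0, s1, s2, s3 = state[0][i], state[1][i], state[2][i], state[3][i]
--         state[0][i] = gmul(0x0e, s0) ^ gmul(0x0b, s1) ^ gmul(0x0d, s2) ^ gmul(0x09, s3)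
--         state[1][i] = gmul(0x09, s0) ^ gmul(0x0e, s1) ^ gmul(0x0b, s2) ^ gmul(0x0d, s3)
--         state[2][i] = gmul(0x0d, s0) ^ gmul(0x09, s1) ^ gmul(0x0e, s2) ^ gmul(0x0b, s3)
--         state[3][i] = gmul(0x0b, s0) ^ gmul(0x0d, s1) ^ gmul(0x09, s2) ^ gmul(0x0e, s3)
--     return state
-- ===== SOURCE B (Python) =====
-- def inv_mix_columns(state):
--     def xtime(x):
--         x <<= 1
--         return (x ^ 0x1b) & 0xff if x & 0x100 else x & 0xff
--
--     def quad(x):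
--         # (14*x, 11*x, 13*x, 9*x) in GF(2^8), via running doublings x,2x,4x,8x
--         x %= 256
--         d = xtime(x)
--         q = xtime(d)
--         e = xtime(q)
--         return e ^ q ^ d, e ^ d ^ x, e ^ q ^ x, e ^ x
--
--     for i in range(4):
--         m0 = quad(state[0][i])
--         m1 = quad(state[1][i])
--         m2 = quad(state[2][i])
--         m3 = quad(state[3][i])
--         state[0][i] = m0[0] ^ m1[1] ^ m2[2] ^ m3[3]
--         state[1][i] = m0[3] ^ m1[0] ^ m2[1] ^ m3[2]
--         state[2][i] = m0[2] ^ m1[3] ^ m2[0] ^ m3[1]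
--         state[3][i] = m0[1] ^ m1[2] ^ m2[3] ^ m3[0]
--     return state
-- ===== Notes on version B (the rewrite author's own statement) =====
-- stated objective: alternative
-- what changed: Replaces A's generic 8-iteration Russian-peasant GF(2^8) multiplication (4 gmul calls per output byte, 16 per column) by a closed xtime-doubling decomposition: per input byte compute x, 2x, 4x, 8x with three xtime steps and obtain 14x, 11x, 13x, 9x as XORs of those, exploiting the fixed InvMixColumns constants; no bit-scanning loop remains.
import Mathlib
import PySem

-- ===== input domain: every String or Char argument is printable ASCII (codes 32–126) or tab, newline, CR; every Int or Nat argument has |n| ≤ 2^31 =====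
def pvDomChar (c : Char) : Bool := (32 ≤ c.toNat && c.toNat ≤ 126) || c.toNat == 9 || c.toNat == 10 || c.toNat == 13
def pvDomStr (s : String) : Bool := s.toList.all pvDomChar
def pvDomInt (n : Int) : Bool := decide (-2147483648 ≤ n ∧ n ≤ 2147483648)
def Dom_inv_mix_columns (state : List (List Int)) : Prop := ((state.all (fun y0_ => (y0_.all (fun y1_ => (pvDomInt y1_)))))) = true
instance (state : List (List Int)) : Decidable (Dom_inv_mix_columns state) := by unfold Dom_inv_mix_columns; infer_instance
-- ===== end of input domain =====

-- B replaces A's generic 8-iteration peasant-multiplication gmul by a closed xtime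
-- (doubling) decomposition of the four fixed constants 14,11,13,9 — per byte it computes
-- x,2x,4x,8x once and XORs them; same in-place mutation of `state` as A, same return value.

-- ===== PORT A =====
-- write v into row r, column i (state[r][i] = v)
def pvSet (st : List (List Int)) (r i : Nat) (v : Int) : List (List Int) :=
  st.set r ((st.getD r []).set i v)

-- the 8 iterations of `for _ in range(8)` inside gmul, as fuel recursion over (p, a, b)
def pvGmulLoop : Nat → Int → Int → Int → Int
  | 0, p, _, _ => p
  | n + 1, p, a, b =>
    let p := if PySem.Int.band b 1 ≠ 0 then PySem.Int.bxor p a else p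
    let hi := PySem.Int.band a 128
    let a := a <<< (1 : Nat)
    let a := if hi ≠ 0 then PySem.Int.bxor a 27 else a
    let a := PySem.Int.band a 255
    pvGmulLoop n p a (b >>> (1 : Nat))

def pvGmul (a b : Int) : Int := pvGmulLoop 8 0 a b

-- one iteration of A's `for i in range(4)` loop
def pvColA (st : List (List Int)) (i : Nat) : List (List Int) :=
  let s0 := (st.getD 0 []).getD i 0
  let s1 := (st.getD 1 []).getD i 0
  let s2 := (st.getD 2 []).getD i 0
  let s3 := (st.getD 3 []).getD i 0
  let st := pvSet st 0 i (PySem.Int.bxor (PySem.Int.bxor (PySem.Int.bxor (pvGmul 14 s0) (pvGmul 11 s1)) (pvGmul 13 s2)) (pvGmul 9 s3))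
  let st := pvSet st 1 i (PySem.Int.bxor (PySem.Int.bxor (PySem.Int.bxor (pvGmul 9 s0) (pvGmul 14 s1)) (pvGmul 11 s2)) (pvGmul 13 s3))
  let st := pvSet st 2 i (PySem.Int.bxor (PySem.Int.bxor (PySem.Int.bxor (pvGmul 13 s0) (pvGmul 9 s1)) (pvGmul 14 s2)) (pvGmul 11 s3))
  pvSet st 3 i (PySem.Int.bxor (PySem.Int.bxor (PySem.Int.bxor (pvGmul 11 s0) (pvGmul 13 s1)) (pvGmul 9 s2)) (pvGmul 14 s3))

def inv_mix_columns (state : List (List Int)) : List (List Int) :=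
  (List.range 4).foldl pvColA state

-- ===== PORT B =====
def pvXtime (x : Int) : Int :=
  let x := x <<< (1 : Nat)
  if PySem.Int.band x 256 ≠ 0 then PySem.Int.band (PySem.Int.bxor x 27) 255
  else PySem.Int.band x 255

-- quad's body after `x %= 256`: the tuple (14x, 11x, 13x, 9x) from x, 2x, 4x, 8x
def pvQuadCore (x : Int) : Int × Int × Int × Int :=
  let d := pvXtime x
  let q := pvXtime d
  let e := pvXtime q
  (PySem.Int.bxor (PySem.Int.bxor e q) d, PySem.Int.bxor (PySem.Int.bxor e d) x,
   PySem.Int.bxor (PySem.Int.bxor e q) x, PySem.Int.bxor e x)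

def pvQuad (x : Int) : Int × Int × Int × Int := pvQuadCore (PySem.Int.mod x 256)

-- one iteration of B's `for i in range(4)` loop
def pvColB (st : List (List Int)) (i : Nat) : List (List Int) :=
  let m0 := pvQuad ((st.getD 0 []).getD i 0)
  let m1 := pvQuad ((st.getD 1 []).getD i 0)
  let m2 := pvQuad ((st.getD 2 []).getD i 0)
  let m3 := pvQuad ((st.getD 3 []).getD i 0)
  let st := pvSet st 0 i (PySem.Int.bxor (PySem.Int.bxor (PySem.Int.bxor m0.1 m1.2.1) m2.2.2.1) m3.2.2.2)
  let st := pvSet st 1 i (PySem.Int.bxor (PySem.Int.bxor (PySem.Int.bxor m0.2.2.2 m1.1) m2.2.1) m3.2.2.1)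
  let st := pvSet st 2 i (PySem.Int.bxor (PySem.Int.bxor (PySem.Int.bxor m0.2.2.1 m1.2.2.2) m2.1) m3.2.1)
  pvSet st 3 i (PySem.Int.bxor (PySem.Int.bxor (PySem.Int.bxor m0.2.1 m1.2.2.1) m2.2.2.2) m3.1)

def inv_mix_columns_alt (state : List (List Int)) : List (List Int) :=
  (List.range 4).foldl pvColB state

-- ===== PRECONDITION & SPEC =====
-- Pre_ excludes exactly the inputs on which the Python A raises IndexError:
-- fewer than 4 rows, or one of the first 4 rows shorter than 4 entries.
def Pre_inv_mix_columns (state : List (List Int)) : Prop :=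
  4 ≤ state.length ∧ ∀ row ∈ state.take 4, 4 ≤ row.length
instance (state : List (List Int)) : Decidable (Pre_inv_mix_columns state) := by
  unfold Pre_inv_mix_columns; infer_instance

def pvWitness_inv_mix_columns : List (List Int) :=
  [[1, 2, 3, 4], [5, 6, 7, 8], [9, 10, 11, 12], [13, 14, 15, 255]]

def Spec_inv_mix_columns (state : List (List Int)) (out : List (List Int)) : Prop :=
  out = inv_mix_columns_alt state
instance (state : List (List Int)) (out : List (List Int)) : Decidable (Spec_inv_mix_columns state out) := by
  unfold Spec_inv_mix_columns; infer_instance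

-- ===== CLAIM (what is proved, stated in full; the proofs are below) =====
def Claim_equal_inv_mix_columns : Prop := ∀ (state : List (List Int)), Dom_inv_mix_columns state → Pre_inv_mix_columns state → Spec_inv_mix_columns state (inv_mix_columns state)

-- ===== LEMMAS AND PROOFS =====
-- gmul's loop only ever consults the low n bits of b: adding 2^n * q changes nothing.
theorem pvGmulLoop_shift (n : Nat) : ∀ (p a q r : Int),
    pvGmulLoop n p a (2 ^ n * q + r) = pvGmulLoop n p a r := by
  induction n with
  | zero => intro p a q r; rfl
  | succ n ih =>
    intro p a q r
    have hform : (2 : Int) ^ (n + 1) * q + r = 2 * (2 ^ n * q) + r := by ring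
    have hband : PySem.Int.band (2 ^ (n + 1) * q + r) 1 = PySem.Int.band r 1 := by
      rw [PySem.Int.band_one, PySem.Int.band_one,
        PySem.Int.mod_eq_emod_of_pos (by norm_num), PySem.Int.mod_eq_emod_of_pos (by norm_num),
        hform]
      omega
    have hshift : (2 ^ (n + 1) * q + r) >>> (1 : Nat) = 2 ^ n * q + r >>> (1 : Nat) := by
      rw [Int.shiftRight_eq_div_pow, Int.shiftRight_eq_div_pow, hform]
      norm_num
      omega
    simp only [pvGmulLoop, hband, hshift, ih]

theorem pvGmul_mod (a b : Int) : pvGmul a b = pvGmul a (PySem.Int.mod b 256) := by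
  unfold pvGmul
  have h := PySem.Int.floordiv_mul_add_mod b 256
  have hb : b = 2 ^ 8 * PySem.Int.floordiv b 256 + PySem.Int.mod b 256 := by
    rw [show ((2 : Int) ^ 8) = 256 by norm_num]; omega
  conv_lhs => rw [hb]
  rw [pvGmulLoop_shift]

-- the xtime decomposition matches gmul byte for byte, checked over all 256 bytes
set_option maxRecDepth 100000 in
theorem pvByteTable : ∀ n ∈ List.range 256,
    (pvGmul 14 (n : Int) == (pvQuadCore (n : Int)).1 &&
     pvGmul 11 (n : Int) == (pvQuadCore (n : Int)).2.1 &&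
     pvGmul 13 (n : Int) == (pvQuadCore (n : Int)).2.2.1 &&
     pvGmul 9 (n : Int) == (pvQuadCore (n : Int)).2.2.2) = true := by
  decide

theorem pvGmul_eq_quad (s : Int) :
    pvGmul 14 s = (pvQuad s).1 ∧ pvGmul 11 s = (pvQuad s).2.1 ∧
    pvGmul 13 s = (pvQuad s).2.2.1 ∧ pvGmul 9 s = (pvQuad s).2.2.2 := by
  have h0 : 0 ≤ PySem.Int.mod s 256 := PySem.Int.mod_nonneg s (by norm_num)
  have h1 : PySem.Int.mod s 256 < 256 := PySem.Int.mod_lt s (by norm_num)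
  obtain ⟨n, hn⟩ : ∃ n : Nat, PySem.Int.mod s 256 = (n : Int) :=
    ⟨(PySem.Int.mod s 256).toNat, (Int.toNat_of_nonneg h0).symm⟩
  have hmem : n ∈ List.range 256 := by
    rw [List.mem_range]; omega
  have ht := pvByteTable n hmem
  simp only [Bool.and_eq_true, beq_iff_eq] at ht
  have h14 : pvGmul 14 s = pvGmul 14 (n : Int) := by rw [pvGmul_mod, hn]
  have h11 : pvGmul 11 s = pvGmul 11 (n : Int) := by rw [pvGmul_mod, hn]
  have h13 : pvGmul 13 s = pvGmul 13 (n : Int) := by rw [pvGmul_mod, hn]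
  have h9 : pvGmul 9 s = pvGmul 9 (n : Int) := by rw [pvGmul_mod, hn]
  refine ⟨?_, ?_, ?_, ?_⟩ <;>
    simp only [pvQuad, hn, h14, h11, h13, h9, ht.1.1.1, ht.1.1.2, ht.1.2, ht.2]

theorem pvCol_eq (st : List (List Int)) (i : Nat) : pvColA st i = pvColB st i := by
  have h0 := pvGmul_eq_quad ((st.getD 0 []).getD i 0)
  have h1 := pvGmul_eq_quad ((st.getD 1 []).getD i 0)
  have h2 := pvGmul_eq_quad ((st.getD 2 []).getD i 0)
  have h3 := pvGmul_eq_quad ((st.getD 3 []).getD i 0)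
  simp only [pvColA, pvColB, h0.1, h0.2.1, h0.2.2.1, h0.2.2.2, h1.1, h1.2.1, h1.2.2.1,
    h1.2.2.2, h2.1, h2.2.1, h2.2.2.1, h2.2.2.2, h3.1, h3.2.1, h3.2.2.1, h3.2.2.2]

-- ===== VERDICT (by name: the statement is the Claim_ definition above) =====
theorem inv_mix_columns_spec : Claim_equal_inv_mix_columns := by
  intro state _ _
  unfold Spec_inv_mix_columns inv_mix_columns inv_mix_columns_alt
  have hcol : pvColA = pvColB := funext fun st => funext fun i => pvCol_eq st i
  rw [hcol]
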